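-- pv_equiv track=rewrite | github.com/sagearbor/dcri-mcp-tools | tools/fda_submission_checker.py | _document_exists
-- ===== SOURCE A (Python) =====
-- from typing import Dict, Any, List
--
-- def _document_exists(required_doc: str, doc_list: List[str]) -> bool:
--     """Check if a required document exists in the document list."""
--     # Convert requirement to searchable terms
--     search_terms = required_doc.replace('_', ' ').lower()
--
--     # Check for exact or partial matches
--     for doc in doc_list:
--         if search_terms in doc or required_doc in doc:
--             return True
--         # Check for common variations
--         if required_doc == 'form_fda_1571' and ('1571' in doc or 'fda 1571' in doc):
--             return True
--         if required_doc == 'form_fda_356h' and ('356h' in doc or 'fda 356h' in doc):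
--             return True
--         if required_doc == 'investigators_brochure' and ('ib' in doc or 'investigator brochure' in doc):
--             return True
--
--     return False
-- ===== SOURCE B (Python) =====
-- from typing import List
--
-- def _document_exists(required_doc: str, doc_list: List[str]) -> bool:
--     """Check if a required document exists in the document list."""
--     def found(pat: str) -> bool:
--         # one pass over the whole list per pattern
--         return any(pat in doc for doc in doc_list)
--
--     # staged passes, pattern-outer instead of A's document-outer loop
--     if found(required_doc.replace('_', ' ').lower()) or found(required_doc):
--         return True
--     if required_doc == 'form_fda_1571':
--         return found('1571') or found('fda 1571')
--     if required_doc == 'form_fda_356h':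
--         return found('356h') or found('fda 356h')
--     if required_doc == 'investigators_brochure':
--         return found('ib') or found('investigator brochure')
--     return False
-- ===== Notes on version B (the rewrite author's own statement) =====
-- stated objective: alternative
-- what changed: The loop nesting is inverted: A scans document-outer, testing all candidate substrings inside each iteration with early return; B runs staged pattern-outer passes, scanning the whole list once per pattern, which is correct because a match exists iff some (doc, pattern) pair matches, independent of traversal order.
import Mathlib
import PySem

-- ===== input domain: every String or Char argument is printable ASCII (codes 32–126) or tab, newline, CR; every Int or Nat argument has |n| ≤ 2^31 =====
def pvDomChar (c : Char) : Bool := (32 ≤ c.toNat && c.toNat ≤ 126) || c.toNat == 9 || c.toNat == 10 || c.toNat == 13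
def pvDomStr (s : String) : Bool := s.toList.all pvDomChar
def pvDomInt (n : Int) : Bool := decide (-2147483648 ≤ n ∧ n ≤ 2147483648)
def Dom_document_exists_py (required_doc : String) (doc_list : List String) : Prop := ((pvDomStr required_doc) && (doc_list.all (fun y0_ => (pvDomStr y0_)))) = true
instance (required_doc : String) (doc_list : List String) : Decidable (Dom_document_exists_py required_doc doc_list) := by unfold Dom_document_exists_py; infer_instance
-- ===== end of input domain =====

-- B inverts the loop nesting: A scans document-outer with all candidate substrings tested
-- inside each iteration; B runs staged pattern-outer passes over the list (objective: alternative).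

-- ===== PORT A =====
-- the early-return for-loop of A, step for step
def documentExistsLoopA (required_doc search_terms : String) : List String → Bool
  | [] => false
  | doc :: rest =>
    if PySem.Str.isIn search_terms doc || PySem.Str.isIn required_doc doc then true
    else if required_doc == "form_fda_1571" && (PySem.Str.isIn "1571" doc || PySem.Str.isIn "fda 1571" doc) then true
    else if required_doc == "form_fda_356h" && (PySem.Str.isIn "356h" doc || PySem.Str.isIn "fda 356h" doc) then true
    else if required_doc == "investigators_brochure" && (PySem.Str.isIn "ib" doc || PySem.Str.isIn "investigator brochure" doc) then true
    else documentExistsLoopA required_doc search_terms rest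

def document_exists_py (required_doc : String) (doc_list : List String) : Bool :=
  let search_terms := PySem.Str.lower (PySem.Str.replace required_doc "_" " ")
  documentExistsLoopA required_doc search_terms doc_list

-- ===== PORT B =====
-- one pass over the whole list per pattern (B's `found`)
def documentExistsFound (doc_list : List String) (pat : String) : Bool :=
  doc_list.any (fun doc => PySem.Str.isIn pat doc)

def document_exists_py_alt (required_doc : String) (doc_list : List String) : Bool :=
  if documentExistsFound doc_list (PySem.Str.lower (PySem.Str.replace required_doc "_" " "))
      || documentExistsFound doc_list required_doc then true
  else if required_doc == "form_fda_1571" then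
    documentExistsFound doc_list "1571" || documentExistsFound doc_list "fda 1571"
  else if required_doc == "form_fda_356h" then
    documentExistsFound doc_list "356h" || documentExistsFound doc_list "fda 356h"
  else if required_doc == "investigators_brochure" then
    documentExistsFound doc_list "ib" || documentExistsFound doc_list "investigator brochure"
  else false

-- ===== PRECONDITION & SPEC =====
def Spec_document_exists_py (required_doc : String) (doc_list : List String) (out : Bool) : Prop := out = document_exists_py_alt required_doc doc_list
instance (required_doc : String) (doc_list : List String) (out : Bool) : Decidable (Spec_document_exists_py required_doc doc_list out) := by unfold Spec_document_exists_py; infer_instance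

-- ===== CLAIM (what is proved, stated in full; the proofs are below) =====
def Claim_equal_document_exists_py : Prop := ∀ (required_doc : String) (doc_list : List String), Dom_document_exists_py required_doc doc_list → Spec_document_exists_py required_doc doc_list (document_exists_py required_doc doc_list)

-- ===== LEMMAS AND PROOFS =====

-- B's per-pattern passes distribute over A's per-document disjunction
lemma any_or {α : Type} (l : List α) (f g : α → Bool) :
    (l.any fun x => f x || g x) = (l.any f || l.any g) := by
  induction l with
  | nil => rfl
  | cons x xs ih =>
    simp [List.any_cons, ih]
    cases f x <;> cases g x <;> simp [Bool.or_assoc, Bool.or_left_comm]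

-- A's early-return loop equals a document-outer `any` of the full branch disjunction
lemma loopA_eq_any (rd st : String) (docs : List String) :
    documentExistsLoopA rd st docs
      = docs.any (fun doc =>
          (PySem.Str.isIn st doc || PySem.Str.isIn rd doc)
          || (rd == "form_fda_1571" && (PySem.Str.isIn "1571" doc || PySem.Str.isIn "fda 1571" doc))
          || (rd == "form_fda_356h" && (PySem.Str.isIn "356h" doc || PySem.Str.isIn "fda 356h" doc))
          || (rd == "investigators_brochure" && (PySem.Str.isIn "ib" doc || PySem.Str.isIn "investigator brochure" doc))) := by
  induction docs with
  | nil => rfl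
  | cons doc rest ih =>
    rw [List.any_cons, documentExistsLoopA]
    split_ifs with h1 h2 h3 h4 <;> simp_all

-- ===== VERDICT (by name: the statement is the Claim_ definition above) =====
theorem document_exists_py_spec : Claim_equal_document_exists_py := by
  intro rd dl _
  show document_exists_py rd dl = document_exists_py_alt rd dl
  simp only [document_exists_py]
  rw [loopA_eq_any]
  by_cases h1 : rd = "form_fda_1571"
  · subst h1
    simp only [show (("form_fda_1571" : String) == "form_fda_1571") = true from rfl,
      show (("form_fda_1571" : String) == "form_fda_356h") = false from rfl,
      show (("form_fda_1571" : String) == "investigators_brochure") = false from rfl,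
      Bool.true_and, Bool.false_and, Bool.or_false]
    simp only [any_or]
    cases ha : dl.any (fun doc => PySem.Str.isIn (PySem.Str.lower (PySem.Str.replace "form_fda_1571" "_" " ")) doc) <;>
      cases hb : dl.any (fun doc => PySem.Str.isIn "form_fda_1571" doc) <;>
        simp only [document_exists_py_alt, documentExistsFound, ha, hb, Bool.or_true,
          Bool.true_or, Bool.false_or, Bool.or_false, if_true, if_false,
          Bool.or_assoc] <;> rfl
  by_cases h2 : rd = "form_fda_356h"
  · subst h2
    simp only [show (("form_fda_356h" : String) == "form_fda_1571") = false from rfl,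
      show (("form_fda_356h" : String) == "form_fda_356h") = true from rfl,
      show (("form_fda_356h" : String) == "investigators_brochure") = false from rfl,
      Bool.true_and, Bool.false_and, Bool.or_false, Bool.false_or]
    simp only [any_or]
    cases ha : dl.any (fun doc => PySem.Str.isIn (PySem.Str.lower (PySem.Str.replace "form_fda_356h" "_" " ")) doc) <;>
      cases hb : dl.any (fun doc => PySem.Str.isIn "form_fda_356h" doc) <;>
        simp only [document_exists_py_alt, documentExistsFound, ha, hb, Bool.or_true,
          Bool.true_or, Bool.false_or, Bool.or_false, if_true, if_false,
          Bool.or_assoc] <;> rfl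
  by_cases h3 : rd = "investigators_brochure"
  · subst h3
    simp only [show (("investigators_brochure" : String) == "form_fda_1571") = false from rfl,
      show (("investigators_brochure" : String) == "form_fda_356h") = false from rfl,
      show (("investigators_brochure" : String) == "investigators_brochure") = true from rfl,
      Bool.true_and, Bool.false_and, Bool.or_false, Bool.false_or]
    simp only [any_or]
    cases ha : dl.any (fun doc => PySem.Str.isIn (PySem.Str.lower (PySem.Str.replace "investigators_brochure" "_" " ")) doc) <;>
      cases hb : dl.any (fun doc => PySem.Str.isIn "investigators_brochure" doc) <;>
        simp only [document_exists_py_alt, documentExistsFound, ha, hb, Bool.or_true,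
          Bool.true_or, Bool.false_or, Bool.or_false, if_true, if_false,
          Bool.or_assoc] <;> rfl
  · have e1 : (rd == "form_fda_1571") = false := by simp [h1]
    have e2 : (rd == "form_fda_356h") = false := by simp [h2]
    have e3 : (rd == "investigators_brochure") = false := by simp [h3]
    simp only [e1, e2, e3, Bool.false_and, Bool.or_false]
    simp only [any_or]
    cases ha : dl.any (fun doc => PySem.Str.isIn (PySem.Str.lower (PySem.Str.replace rd "_" " ")) doc) <;>
      cases hb : dl.any (fun doc => PySem.Str.isIn rd doc) <;>
        simp only [document_exists_py_alt, documentExistsFound, ha, hb, e1, e2, e3,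
          Bool.or_true, Bool.true_or, Bool.false_or, Bool.or_false, if_true, if_false] <;> rfl
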